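-- pv_equiv track=rewrite | github.com/zsaziz/twitter-hangman-game | src/google_utils/google_forms_utils.py | generate_choices_for_update
-- ===== SOURCE A (Python) =====
-- import string
--
-- def generate_choices_for_update(guessed_letters=None):
--     if guessed_letters is None:
--         guessed_letters = []
--     body = []
--     for letter in list(string.ascii_uppercase):
--         if letter not in guessed_letters:
--             body.append({
--                 'value': letter
--             })
--     return body
-- ===== SOURCE B (Python) =====
-- import string
--
--
-- def generate_choices_for_update(guessed_letters=None):
--     if guessed_letters is None:
--         guessed_letters = []
--     remaining = list(string.ascii_uppercase)
--     for g in guessed_letters: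
--         try:
--             remaining.remove(g)
--         except ValueError:
--             pass
--     return [{'value': letter} for letter in remaining]
-- ===== Notes on version B (the rewrite author's own statement) =====
-- stated objective: alternative
-- what changed: Instead of scanning the alphabet and testing each letter for membership in guessed_letters, B starts from the full alphabet list and iterates over guessed_letters, deleting each guess from the remaining list (list.remove, ignoring misses), then emits the survivors.
import Mathlib
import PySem

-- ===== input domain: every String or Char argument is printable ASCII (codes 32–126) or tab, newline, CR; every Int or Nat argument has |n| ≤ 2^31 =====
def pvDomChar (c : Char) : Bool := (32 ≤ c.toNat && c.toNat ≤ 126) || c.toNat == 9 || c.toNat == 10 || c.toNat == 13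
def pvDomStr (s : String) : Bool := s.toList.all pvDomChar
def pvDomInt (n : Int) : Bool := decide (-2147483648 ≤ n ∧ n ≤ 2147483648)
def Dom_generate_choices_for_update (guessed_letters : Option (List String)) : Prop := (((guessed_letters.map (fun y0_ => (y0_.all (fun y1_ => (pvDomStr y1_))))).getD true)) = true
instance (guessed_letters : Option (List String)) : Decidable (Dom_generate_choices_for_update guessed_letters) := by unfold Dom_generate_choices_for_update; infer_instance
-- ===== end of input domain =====

-- B iterates over guessed_letters, deleting each guess from the remaining alphabet list
-- (list.remove, ignoring misses), instead of scanning the alphabet with a membership test;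
-- objective: alternative (same cost, different traversal and maintained state).

-- string.ascii_uppercase, as the list of its one-character strings
def pvAsciiUppercase : List String :=
  ["A","B","C","D","E","F","G","H","I","J","K","L","M",
   "N","O","P","Q","R","S","T","U","V","W","X","Y","Z"]

-- ===== PORT A =====
def generate_choices_for_update (guessed_letters : Option (List String)) : List (List (String × String)) :=
  let guessed := guessed_letters.getD []
  pvAsciiUppercase.foldl
    (fun body letter =>
      if !(guessed.contains letter) then body ++ [[("value", letter)]] else body)
    []

-- ===== PORT B =====
def generate_choices_for_update_alt (guessed_letters : Option (List String)) : List (List (String × String)) :=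
  let guessed := guessed_letters.getD []
  -- for g in guessed: try remaining.remove(g) except ValueError: pass
  let remaining := guessed.foldl
    (fun rem g => match PySem.List.remove? rem g with | some r => r | none => rem)
    pvAsciiUppercase
  remaining.map (fun letter => [("value", letter)])

-- ===== PRECONDITION & SPEC =====
def Spec_generate_choices_for_update (guessed_letters : Option (List String)) (out : List (List (String × String))) : Prop := out = generate_choices_for_update_alt guessed_letters
instance (guessed_letters : Option (List String)) (out : List (List (String × String))) : Decidable (Spec_generate_choices_for_update guessed_letters out) := by unfold Spec_generate_choices_for_update; infer_instance

-- ===== CLAIM =====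
def Claim_equal_generate_choices_for_update : Prop := ∀ (guessed_letters : Option (List String)), Dom_generate_choices_for_update guessed_letters → Spec_generate_choices_for_update guessed_letters (generate_choices_for_update guessed_letters)

-- ===== LEMMAS AND PROOFS =====

-- A's loop is "append the record when the filter predicate holds"
theorem pvA_eq_filter_map (guessed : List String) :
    pvAsciiUppercase.foldl
      (fun body letter =>
        if !(guessed.contains letter) then body ++ [[("value", letter)]] else body)
      ([] : List (List (String × String)))
    = (pvAsciiUppercase.filter (fun l => !(guessed.contains l))).map
        (fun letter => [(("value" : String), letter)]) := by
  simpa using PySem.List.foldl_append_if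
    (fun l => !(guessed.contains l))
    (fun letter => [(("value" : String), letter)])
    pvAsciiUppercase ([] : List (List (String × String)))

-- B's deletion loop over a duplicate-free list computes the same filter
theorem pvRemove_fold_eq_filter (gs : List String) :
    ∀ (xs : List String), xs.Nodup →
    gs.foldl (fun rem g => match PySem.List.remove? rem g with | some r => r | none => rem) xs
      = xs.filter (fun x => !(gs.contains x)) := by
  induction gs with
  | nil => intro xs _; simp
  | cons g gs ih =>
    intro xs hnd
    by_cases hg : g ∈ xs
    · have hrem : PySem.List.remove? xs g = some (xs.erase g) :=
        PySem.List.remove?_eq_some_erase xs g hg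
      have herase : xs.erase g = xs.filter (fun x => !(x == g)) := by
        rw [List.Nodup.erase_eq_filter hnd]
        simp only [bne]
      simp only [List.foldl_cons, hrem]
      rw [ih _ (hnd.erase g), herase, List.filter_filter]
      refine List.filter_congr (fun x _ => ?_)
      by_cases hxg : x = g <;> simp [hxg]
    · have hrem : PySem.List.remove? xs g = none :=
        (PySem.List.remove?_eq_none_iff xs g).mpr hg
      simp only [List.foldl_cons, hrem]
      rw [ih _ hnd]
      refine List.filter_congr (fun x hx => ?_)
      have : x ≠ g := fun h => hg (h ▸ hx)
      simp [this]

-- ===== VERDICT =====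
theorem generate_choices_for_update_spec : Claim_equal_generate_choices_for_update := by
  intro guessed_letters _
  show generate_choices_for_update guessed_letters = generate_choices_for_update_alt guessed_letters
  simp only [generate_choices_for_update, generate_choices_for_update_alt]
  rw [pvA_eq_filter_map, pvRemove_fold_eq_filter _ _ (by decide)]
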